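-- pv_equiv track=rewrite | github.com/kdelwat/Onset | app/parse.py | valid_subword
-- ===== SOURCE A (Python) =====
-- def valid_subword(subword, available_segments, available_diacritics):
--     '''Determines whether a string is a valid IPA segment.'''
--
--     # If it's a simple IPA sequence, return True
--     if subword in available_segments:
--         return True
--
--     # Iterate through the string, slicing at each index. If the first part is
--     # an IPA sequence and the second half is entirely made up of diacritics,
--     # it's valid.
--     for i in range(1, len(subword)):
--         if subword[:i] in available_segments and all([x in available_diacritics
--                                                       for x in subword[i:]]):
--             return True
--     else:
--         return False
-- ===== SOURCE B (Python) =====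
-- def valid_subword(subword, available_segments, available_diacritics):
--     '''Determines whether a string is a valid IPA segment.'''
--     if subword in available_segments:
--         return True
--     # One backward pass: k is the boundary; everything from k on is a diacritic.
--     k = len(subword)
--     while k > 0 and subword[k - 1] in available_diacritics:
--         k -= 1
--     # A valid split needs a non-empty proper prefix that is a segment and a
--     # suffix made only of diacritics, i.e. a cut point i with max(1, k) <= i < len.
--     for i in range(max(1, k), len(subword)):
--         if subword[:i] in available_segments:
--             return True
--     return False
-- ===== Notes on version B (the rewrite author's own statement) =====
-- stated objective: faster
-- what changed: Replaces the per-cut-point rescan of the whole suffix (all(x in diacritics for x in subword[i:]) at every i) by one backward pass computing the diacritic boundary k, then a single prefix-membership scan starting at max(1,k).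
import Mathlib
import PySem

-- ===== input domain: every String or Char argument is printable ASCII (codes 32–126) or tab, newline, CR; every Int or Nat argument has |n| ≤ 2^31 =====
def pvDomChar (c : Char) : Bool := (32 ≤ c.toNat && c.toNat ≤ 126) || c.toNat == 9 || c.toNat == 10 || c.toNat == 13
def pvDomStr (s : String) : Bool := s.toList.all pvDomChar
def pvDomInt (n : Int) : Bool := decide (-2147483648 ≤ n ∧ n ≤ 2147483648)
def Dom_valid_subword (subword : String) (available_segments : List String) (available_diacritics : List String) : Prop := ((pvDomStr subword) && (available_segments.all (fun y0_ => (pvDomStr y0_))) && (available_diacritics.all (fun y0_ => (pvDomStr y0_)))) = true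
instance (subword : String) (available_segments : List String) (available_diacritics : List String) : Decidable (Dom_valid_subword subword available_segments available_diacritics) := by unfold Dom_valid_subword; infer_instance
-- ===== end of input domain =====

-- B replaces A's per-cut-point rescan of the whole suffix by one backward pass
-- computing the diacritic boundary, then a single prefix-membership scan (objective: faster, constant-factor).

-- ===== PORT A =====
-- literal port of A: direct membership, then for each i in range(1, len) test
-- 'subword[:i] in segments and all(x in diacritics for x in subword[i:])' (early return = .any)
def valid_subword (subword : String) (available_segments : List String) (available_diacritics : List String) : Bool :=
  if subword ∈ available_segments then true
  else
    (PySem.List.pyRange 1 (PySem.Str.len subword) 1).any (fun i =>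
      decide (PySem.Str.slice subword none (some i) ∈ available_segments) &&
      (PySem.Str.slice subword (some i) none).toList.all
        (fun x => decide (String.ofList [x] ∈ available_diacritics)))

-- ===== PORT B =====
-- the while loop 'while k > 0 and subword[k-1] in diacritics: k -= 1', recursing on k;
-- cs.getD (k) ' ' is exact for subword[k] here since every call keeps k < len(subword)
def diaBoundary (available_diacritics : List String) (cs : List Char) : Nat → Nat
  | 0 => 0
  | k + 1 =>
    if String.ofList [cs.getD k ' '] ∈ available_diacritics then
      diaBoundary available_diacritics cs k
    else k + 1

def valid_subword_alt (subword : String) (available_segments : List String) (available_diacritics : List String) : Bool :=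
  if subword ∈ available_segments then true
  else
    let cs := subword.toList
    let k := diaBoundary available_diacritics cs cs.length
    (PySem.List.pyRange (max 1 (k : Int)) cs.length 1).any (fun i =>
      decide (PySem.Str.slice subword none (some i) ∈ available_segments))

-- ===== PRECONDITION & SPEC =====
def Spec_valid_subword (subword : String) (available_segments : List String) (available_diacritics : List String) (out : Bool) : Prop := out = valid_subword_alt subword available_segments available_diacritics
instance (subword : String) (available_segments : List String) (available_diacritics : List String) (out : Bool) : Decidable (Spec_valid_subword subword available_segments available_diacritics out) := by unfold Spec_valid_subword; infer_instance

-- ===== CLAIM (what is proved, stated in full; the proofs are below) =====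
def Claim_equal_valid_subword : Prop := ∀ (subword : String) (available_segments : List String) (available_diacritics : List String), Dom_valid_subword subword available_segments available_diacritics → Spec_valid_subword subword available_segments available_diacritics (valid_subword subword available_segments available_diacritics)

-- ===== LEMMAS AND PROOFS =====

lemma diaBoundary_le (d : List String) (cs : List Char) : ∀ j, diaBoundary d cs j ≤ j := by
  intro j
  induction j with
  | zero => simp [diaBoundary]
  | succ k ih =>
    simp only [diaBoundary]
    split
    · omega
    · omega

lemma diaBoundary_dia (d : List String) (cs : List Char) :
    ∀ j m, diaBoundary d cs j ≤ m → m < j → String.ofList [cs.getD m ' '] ∈ d := by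
  intro j
  induction j with
  | zero => intro m _ h; omega
  | succ k ih =>
    intro m h1 h2
    by_cases hc : String.ofList [cs.getD k ' '] ∈ d
    · simp only [diaBoundary, if_pos hc] at h1
      rcases Nat.lt_or_ge m k with hm | hm
      · exact ih m h1 hm
      · have : m = k := by omega
        subst this; exact hc
    · simp only [diaBoundary, if_neg hc] at h1
      omega

lemma diaBoundary_stop (d : List String) (cs : List Char) :
    ∀ j, diaBoundary d cs j = 0 ∨
      ¬ String.ofList [cs.getD (diaBoundary d cs j - 1) ' '] ∈ d := by
  intro j
  induction j with
  | zero => left; simp [diaBoundary]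
  | succ k ih =>
    by_cases hc : String.ofList [cs.getD k ' '] ∈ d
    · simpa only [diaBoundary, if_pos hc] using ih
    · right
      simp only [diaBoundary, if_neg hc]
      simpa using hc

-- (cs.drop i).all p ↔ every position m ∈ [i, len) satisfies p (stated via getD)
lemma all_drop_iff (cs : List Char) (p : Char → Bool) (i : Nat) (hi : i ≤ cs.length) :
    (cs.drop i).all p = true ↔ ∀ m, i ≤ m → m < cs.length → p (cs.getD m ' ') = true := by
  rw [List.all_eq_true]
  constructor
  · intro h m h1 h2
    have hlt : m - i < (cs.drop i).length := by simp [List.length_drop]; omega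
    have heq : (cs.drop i)[m - i]'hlt = cs[m]'h2 := by
      rw [List.getElem_drop]; congr 1; omega
    rw [List.getD_eq_getElem cs ' ' h2, ← heq]
    exact h _ (List.getElem_mem hlt)
  · intro h x hx
    rcases List.mem_iff_getElem.mp hx with ⟨m, hm, rfl⟩
    rw [List.getElem_drop]
    have h2 : i + m < cs.length := by simp [List.length_drop] at hm; omega
    rw [← List.getD_eq_getElem cs ' ' h2]
    exact h (i + m) (by omega) h2

-- A's suffix test at cut point i equals 'diaBoundary ≤ i'
lemma all_drop_iff_boundary (d : List String) (cs : List Char) (i : Nat) (hi : i ≤ cs.length) :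
    (cs.drop i).all (fun x => decide (String.ofList [x] ∈ d)) = true ↔
      diaBoundary d cs cs.length ≤ i := by
  rw [all_drop_iff cs _ i hi]
  constructor
  · intro h
    by_contra hlt
    push Not at hlt
    have hk := diaBoundary_le d cs cs.length
    rcases diaBoundary_stop d cs cs.length with h0 | hst
    · omega
    · exact hst (by
        have := h (diaBoundary d cs cs.length - 1) (by omega) (by omega)
        simpa using this)
  · intro h m h1 h2
    simpa using diaBoundary_dia d cs cs.length m (by omega) h2

theorem valid_subword_eq_alt (subword : String) (segs dias : List String) :
    valid_subword subword segs dias = valid_subword_alt subword segs dias := by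
  unfold valid_subword valid_subword_alt
  by_cases hmem : subword ∈ segs
  · simp [hmem]
  · simp only [if_neg hmem]
    set cs := subword.toList with hcs
    set k := diaBoundary dias cs cs.length with hk
    have hklen : k ≤ cs.length := diaBoundary_le dias cs cs.length
    have hlen : PySem.Str.len subword = (cs.length : Int) := by
      simp [PySem.Str.len_eq, hcs]
    rw [Bool.eq_iff_iff]
    simp only [List.any_eq_true, PySem.List.mem_pyRange_one, hlen,
      Bool.and_eq_true, decide_eq_true_eq]
    constructor
    · rintro ⟨i, ⟨h1, h2⟩, hpre, hall⟩
      have h0 : (0 : Int) ≤ i := by omega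
      refine ⟨i, ⟨?_, by exact_mod_cast h2⟩, hpre⟩
      have hall' : (cs.drop i.toNat).all (fun x => decide (String.ofList [x] ∈ dias)) = true := by
        have := PySem.Str.toList_slice subword (some i) none
        rw [PySem.Chars.slice_eq_listSlice, PySem.List.slice_from _ h0] at this
        rwa [this] at hall
      have := (all_drop_iff_boundary dias cs i.toNat (by omega)).mp hall'
      omega
    · rintro ⟨i, ⟨h1, h2⟩, hpre⟩
      have h0 : (0 : Int) ≤ i := by omega
      have hki : (k : Int) ≤ i := by omega
      refine ⟨i, ⟨by omega, h2⟩, hpre, ?_⟩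
      have hall' : (cs.drop i.toNat).all (fun x => decide (String.ofList [x] ∈ dias)) = true := by
        apply (all_drop_iff_boundary dias cs i.toNat (by omega)).mpr
        omega
      have := PySem.Str.toList_slice subword (some i) none
      rw [PySem.Chars.slice_eq_listSlice, PySem.List.slice_from _ h0] at this
      rwa [this]

-- ===== VERDICT (by name: the statement is the Claim_ definition above) =====
theorem valid_subword_spec : Claim_equal_valid_subword := by
  intro subword segs dias _
  unfold Spec_valid_subword
  exact valid_subword_eq_alt subword segs dias
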